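-- pv_equiv track=rewrite | github.com/chuatt/HackerRank | python/algorithms/n17_string_validators.py | string_validators
-- ===== SOURCE A (Python) =====
-- def string_validators(s: str) -> list[bool]:
--     """Return validation results for the given string."""
--     return [
--         any(c.isalnum() for c in s),
--         any(c.isalpha() for c in s),
--         any(c.isdigit() for c in s),
--         any(c.islower() for c in s),
--         any(c.isupper() for c in s),
--     ]
-- ===== SOURCE B (Python) =====
-- def string_validators(s: str) -> list[bool]:
--     """Return validation results for the given string."""
--     alnum = alpha = digit = lower = upper = False
--     for c in s:
--         alnum = alnum or c.isalnum()
--         alpha = alpha or c.isalpha()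
--         digit = digit or c.isdigit()
--         lower = lower or c.islower()
--         upper = upper or c.isupper()
--     return [alnum, alpha, digit, lower, upper]
-- ===== Notes on version B (the rewrite author's own statement) =====
-- stated objective: alternative
-- what changed: Replaces five separate any() scans over the string with a single loop maintaining five boolean accumulators.
import Mathlib
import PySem

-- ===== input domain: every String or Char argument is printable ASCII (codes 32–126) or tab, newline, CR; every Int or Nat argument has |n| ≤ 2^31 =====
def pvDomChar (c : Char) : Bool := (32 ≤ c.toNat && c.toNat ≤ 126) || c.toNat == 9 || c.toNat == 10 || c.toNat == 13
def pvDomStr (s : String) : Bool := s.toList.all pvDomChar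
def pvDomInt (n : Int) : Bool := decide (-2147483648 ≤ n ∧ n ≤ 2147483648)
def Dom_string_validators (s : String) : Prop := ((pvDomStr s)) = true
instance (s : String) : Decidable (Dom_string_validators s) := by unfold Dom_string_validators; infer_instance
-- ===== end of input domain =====

-- B replaces A's five separate any() scans with one pass maintaining five boolean accumulators (objective: alternative).

-- ===== PORT A =====
def string_validators (s : String) : List Bool :=
  [ s.toList.any PySem.Chars.isalnum,
    s.toList.any PySem.Chars.isalpha,
    s.toList.any PySem.Chars.isdigit,
    s.toList.any PySem.Chars.islower,
    s.toList.any PySem.Chars.isupper ]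

-- ===== PORT B =====
def string_validators_alt (s : String) : List Bool :=
  let st := s.toList.foldl
    (fun (acc : Bool × Bool × Bool × Bool × Bool) c =>
      (acc.1 || PySem.Chars.isalnum c,
       acc.2.1 || PySem.Chars.isalpha c,
       acc.2.2.1 || PySem.Chars.isdigit c,
       acc.2.2.2.1 || PySem.Chars.islower c,
       acc.2.2.2.2 || PySem.Chars.isupper c))
    (false, false, false, false, false)
  [st.1, st.2.1, st.2.2.1, st.2.2.2.1, st.2.2.2.2]

-- ===== PRECONDITION & SPEC =====
def Spec_string_validators (s : String) (out : List Bool) : Prop := out = string_validators_alt s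
instance (s : String) (out : List Bool) : Decidable (Spec_string_validators s out) := by unfold Spec_string_validators; infer_instance

-- ===== CLAIM (what is proved, stated in full; the proofs are below) =====
def Claim_equal_string_validators : Prop := ∀ (s : String), Dom_string_validators s → Spec_string_validators s (string_validators s)

-- ===== LEMMAS AND PROOFS =====

theorem sv_fold_eq (l : List Char) (a b c d e : Bool) :
    l.foldl
      (fun (acc : Bool × Bool × Bool × Bool × Bool) ch =>
        (acc.1 || PySem.Chars.isalnum ch,
         acc.2.1 || PySem.Chars.isalpha ch,
         acc.2.2.1 || PySem.Chars.isdigit ch,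
         acc.2.2.2.1 || PySem.Chars.islower ch,
         acc.2.2.2.2 || PySem.Chars.isupper ch))
      (a, b, c, d, e)
    = (a || l.any PySem.Chars.isalnum,
       b || l.any PySem.Chars.isalpha,
       c || l.any PySem.Chars.isdigit,
       d || l.any PySem.Chars.islower,
       e || l.any PySem.Chars.isupper) := by
  induction l generalizing a b c d e with
  | nil => simp
  | cons x xs ih => simp [List.foldl, ih, Bool.or_assoc]

-- ===== VERDICT (by name: the statement is the Claim_ definition above) =====
theorem string_validators_spec : Claim_equal_string_validators := by
  intro s _
  unfold Spec_string_validators string_validators string_validators_alt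
  simp [sv_fold_eq]
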